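-- pv_equiv track=rewrite | github.com/roctbb/ai-game-engine | games/farm_grid/engine.py | _placements
-- ===== SOURCE A (Python) =====
-- def _placements(team_ids: dict[str, str], slot_scores: dict[str, int], slots: list[str]) -> dict[str, int]:
--     ordered = sorted(slots, key=lambda slot: (-slot_scores[slot], slot))
--     placements: dict[str, int] = {}
--     last_score = None; last_place = 0
--     for index, slot in enumerate(ordered, start=1):
--         score = slot_scores[slot]
--         place = last_place if score == last_score else index
--         placements[team_ids[slot]] = place
--         last_score = score; last_place = place
--     return placements
-- ===== SOURCE B (Python) =====
-- def _placements(team_ids: dict[str, str], slot_scores: dict[str, int], slots: list[str]) -> dict[str, int]: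
--     # competition rank computed directly: place = 1 + number of slots with strictly
--     # greater score; inserted in the same descending (-score, slot) order as A.
--     ordered = sorted(slots, key=lambda s: (-slot_scores[s], s))
--     placements: dict[str, int] = {}
--     for s in ordered:
--         placements[team_ids[s]] = 1 + sum(1 for t in slots if slot_scores[t] > slot_scores[s])
--     return placements
-- ===== Notes on version B (the rewrite author's own statement) =====
-- stated objective: simpler
-- what changed: Replaced A's stateful sorted-scan (running last_score/last_place with enumerate) by the direct competition-rank formula: each slot's place is 1 + the count of slots with strictly greater score, inserted in the same descending (-score, slot) order.
import Mathlib
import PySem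

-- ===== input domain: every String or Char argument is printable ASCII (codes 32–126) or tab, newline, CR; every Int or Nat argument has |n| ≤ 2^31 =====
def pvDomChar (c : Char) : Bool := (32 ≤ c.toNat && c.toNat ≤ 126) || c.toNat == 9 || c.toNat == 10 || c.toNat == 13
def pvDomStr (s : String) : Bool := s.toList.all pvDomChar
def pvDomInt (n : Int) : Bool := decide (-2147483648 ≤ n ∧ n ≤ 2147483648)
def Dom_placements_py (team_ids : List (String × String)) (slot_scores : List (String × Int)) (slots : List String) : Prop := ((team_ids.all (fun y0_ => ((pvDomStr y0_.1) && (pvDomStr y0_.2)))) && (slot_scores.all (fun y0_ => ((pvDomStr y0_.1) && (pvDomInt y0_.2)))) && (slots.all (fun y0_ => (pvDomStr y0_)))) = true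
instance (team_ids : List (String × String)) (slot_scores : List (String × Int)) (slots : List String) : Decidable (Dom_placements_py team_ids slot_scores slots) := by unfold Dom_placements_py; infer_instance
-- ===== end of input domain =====

-- B replaces A's stateful sorted-scan by the direct competition-rank count formula (simpler); same insertion order.
-- ===== PORT A =====
def placements_py (team_ids : List (String × String)) (slot_scores : List (String × Int)) (slots : List String) : List (String × Int) :=
  let sd := PySem.Dict.ofList slot_scores
  let td := PySem.Dict.ofList team_ids
  let ordered := PySem.List.sorted slots (fun slot => toLex (-(sd.getD slot 0), slot)) false
  let fin := (PySem.List.enumerate ordered 1).foldl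
    (fun (st : PySem.Dict String Int × Option Int × Int) (p : Int × String) =>
      let score := sd.getD p.2 0
      let place := if some score == st.2.1 then st.2.2 else p.1
      (st.1.insert (td.getD p.2 "") place, some score, place))
    (PySem.Dict.empty, none, 0)
  fin.1.items

-- ===== PORT B =====
def placements_py_alt (team_ids : List (String × String)) (slot_scores : List (String × Int)) (slots : List String) : List (String × Int) :=
  let sd := PySem.Dict.ofList slot_scores
  let td := PySem.Dict.ofList team_ids
  let ordered := PySem.List.sorted slots (fun s => toLex (-(sd.getD s 0), s)) false
  (ordered.foldl
    (fun (d : PySem.Dict String Int) (s : String) =>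
      d.insert (td.getD s "")
        (1 + slots.foldl (fun c t => if sd.getD t 0 > sd.getD s 0 then c + 1 else c) (0 : Int)))
    PySem.Dict.empty).items

-- ===== PRECONDITION & SPEC =====
-- Pre_ excludes exactly the inputs where Python A raises KeyError: a slot missing from slot_scores or team_ids.
def Pre_placements_py (team_ids : List (String × String)) (slot_scores : List (String × Int)) (slots : List String) : Prop :=
  ∀ s ∈ slots, s ∈ slot_scores.map Prod.fst ∧ s ∈ team_ids.map Prod.fst
instance (team_ids : List (String × String)) (slot_scores : List (String × Int)) (slots : List String) : Decidable (Pre_placements_py team_ids slot_scores slots) := by unfold Pre_placements_py; infer_instance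
def pvWitness_placements_py : (List (String × String)) × (List (String × Int)) × List String :=
  ([("a", "t1"), ("b", "t2"), ("c", "t3")], [("a", 3), ("b", 5), ("c", 5)], ["a", "b", "c"])
def Spec_placements_py (team_ids : List (String × String)) (slot_scores : List (String × Int)) (slots : List String) (out : List (String × Int)) : Prop := out = placements_py_alt team_ids slot_scores slots
instance (team_ids : List (String × String)) (slot_scores : List (String × Int)) (slots : List String) (out : List (String × Int)) : Decidable (Spec_placements_py team_ids slot_scores slots out) := by unfold Spec_placements_py; infer_instance

-- ===== CLAIM (what is proved, stated in full; the proofs are below) =====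
def Claim_equal_placements_py : Prop := ∀ (team_ids : List (String × String)) (slot_scores : List (String × Int)) (slots : List String), Dom_placements_py team_ids slot_scores slots → Pre_placements_py team_ids slot_scores slots → Spec_placements_py team_ids slot_scores slots (placements_py team_ids slot_scores slots)

-- ===== LEMMAS AND PROOFS =====

def cntGT (f : String → Int) (xs : List String) (v : Int) : Nat :=
  xs.countP (fun t => decide (v < f t))

theorem foldl_count (f : String → Int) (v : Int) :
    ∀ (xs : List String) (c : Int),
      xs.foldl (fun c t => if v < f t then c + 1 else c) c = c + (cntGT f xs v : Int) := by
  intro xs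
  induction xs with
  | nil => intro c; simp [cntGT]
  | cons x t ih =>
    intro c
    by_cases h : v < f x <;> simp [cntGT, h, ih, Int.add_comm, Int.add_assoc]

theorem cntGT_append (f : String → Int) (l₁ l₂ : List String) (v : Int) :
    cntGT f (l₁ ++ l₂) v = cntGT f l₁ v + cntGT f l₂ v := by
  simp [cntGT, List.countP_append]

theorem cntGT_eq_zero (f : String → Int) (l : List String) (v : Int)
    (h : ∀ x ∈ l, f x ≤ v) : cntGT f l v = 0 := by
  simp only [cntGT, List.countP_eq_zero]
  intro x hx
  simpa using not_lt.mpr (h x hx)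

theorem cntGT_eq_length (f : String → Int) (l : List String) (v : Int)
    (h : ∀ x ∈ l, v < f x) : cntGT f l v = l.length := by
  simp only [cntGT, List.countP_eq_length]
  intro x hx
  simpa using h x hx

-- the A-side loop, with a processed prefix `pre` abstracted out, produces B's per-element values
theorem a_fold_eq (f : String → Int) (g : String → String) :
    ∀ (rest pre : List String) (d : PySem.Dict String Int) (ls : Option Int) (lp : Int),
      rest.Pairwise (fun a b => f b ≤ f a) →
      (∀ x ∈ pre, ∀ y ∈ rest, f y ≤ f x) →
      (match ls with
       | none => pre = []
       | some v => lp = 1 + (cntGT f pre v : Int) ∧ (∀ x ∈ pre, v ≤ f x) ∧ (∀ y ∈ rest, f y ≤ v)) →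
      ((PySem.List.enumerate rest ((pre.length : Int) + 1)).foldl
          (fun (st : PySem.Dict String Int × Option Int × Int) (p : Int × String) =>
            let score := f p.2
            let place := if some score == st.2.1 then st.2.2 else p.1
            (st.1.insert (g p.2) place, some score, place)) (d, ls, lp)).1
        = rest.foldl (fun d' s => d'.insert (g s) (1 + (cntGT f (pre ++ rest) (f s) : Int))) d := by
  intro rest
  induction rest with
  | nil =>
    intro pre d ls lp _ _ _
    simp [PySem.List.enumerate_nil]
  | cons y rest' ih =>
    intro pre d ls lp hsort hcross hinv
    have hsort' : rest'.Pairwise (fun a b => f b ≤ f a) := hsort.of_cons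
    have hy : ∀ z ∈ rest', f z ≤ f y := by
      intro z hz; exact (List.pairwise_cons.mp hsort).1 z hz
    rw [PySem.List.enumerate_cons]
    simp only [List.foldl_cons]
    -- the place assigned to y
    set place : Int := if (some (f y) == ls) then lp else ((pre.length : Int) + 1) with hplace
    have hval : place = 1 + (cntGT f (pre ++ [y]) (f y) : Int) := by
      cases ls with
      | none =>
        have hpre : pre = [] := hinv
        subst hpre
        simp [hplace, cntGT]
      | some v =>
        obtain ⟨hlp, hge, hle⟩ := hinv
        by_cases hv : f y = v
        · have hbe : (some (f y) == some v) = true := by simp [hv]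
          have h0 : cntGT f [y] v = 0 := cntGT_eq_zero f [y] v (by simp [hv])
          rw [hplace, if_pos hbe, hlp, hv, cntGT_append, h0]
          omega
        · have hlt : f y < v := lt_of_le_of_ne (hle y (by simp)) hv
          have h1 : cntGT f pre (f y) = pre.length :=
            cntGT_eq_length f pre (f y) (fun x hx => lt_of_lt_of_le hlt (hge x hx))
          have h0 : cntGT f [y] (f y) = 0 := cntGT_eq_zero f [y] (f y) (by simp)
          rw [hplace, if_neg (by simp [hv]), cntGT_append, h1, h0]
          omega
    have hidx : ((pre ++ [y]).length : Int) + 1 = (pre.length : Int) + 1 + 1 := by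
      simp
    have hcross' : ∀ x ∈ pre ++ [y], ∀ z ∈ rest', f z ≤ f x := by
      intro x hx z hz
      rcases List.mem_append.mp hx with h | h
      · exact hcross x h z (List.mem_cons_of_mem _ hz)
      · simp only [List.mem_singleton] at h; subst h; exact hy z hz
    have hinv' : (match (some (f y) : Option Int) with
       | none => pre ++ [y] = []
       | some v => place = 1 + (cntGT f (pre ++ [y]) v : Int) ∧ (∀ x ∈ pre ++ [y], v ≤ f x) ∧
           (∀ z ∈ rest', f z ≤ v)) := by
      refine ⟨hval, ?_, hy⟩
      intro x hx
      rcases List.mem_append.mp hx with h | h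
      · cases ls with
        | none => simp [hinv] at h
        | some v =>
          obtain ⟨_, hge, hle⟩ := hinv
          exact le_trans (hle y (by simp)) (hge x h)
      · simp only [List.mem_singleton] at h; subst h; exact le_rfl
    have := ih (pre ++ [y]) (d.insert (g y) place) (some (f y)) place hsort' hcross' hinv'
    rw [hidx] at this
    rw [this, hval]
    have hzero : cntGT f rest' (f y) = 0 := cntGT_eq_zero f rest' (f y) hy
    have hfull : cntGT f (pre ++ y :: rest') (f y) = cntGT f (pre ++ [y]) (f y) := by
      rw [show pre ++ y :: rest' = (pre ++ [y]) ++ rest' by simp, cntGT_append, hzero]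
      omega
    simp only [List.append_assoc, List.singleton_append]
    rw [hfull]

theorem pairwise_of_sorted (f : String → Int) (slots : List String) :
    (PySem.List.sorted slots (fun s => toLex (-(f s), s)) false).Pairwise
      (fun a b => f b ≤ f a) := by
  have h := PySem.List.sorted_pairwise slots (fun s => toLex (-(f s), s))
  refine h.imp ?_
  intro a b hab
  rcases Prod.Lex.le_iff.mp hab with h1 | ⟨h1, _⟩ <;> simp only [ofLex_toLex] at h1 <;> omega


-- ===== VERDICT (by name: the statement is the Claim_ definition above) =====
theorem placements_py_spec : Claim_equal_placements_py := by
  unfold Claim_equal_placements_py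
  intro team_ids slot_scores slots _ _
  unfold Spec_placements_py placements_py placements_py_alt
  dsimp only
  set sd := PySem.Dict.ofList slot_scores with hsd
  set td := PySem.Dict.ofList team_ids with htd
  set f : String → Int := fun s => sd.getD s 0 with hf
  set g : String → String := fun s => td.getD s "" with hg
  set ordered := PySem.List.sorted slots (fun s => toLex (-(f s), s)) false with hord
  have hsort : ordered.Pairwise (fun a b => f b ≤ f a) := pairwise_of_sorted f slots
  have hperm : ordered.Perm slots := PySem.List.sorted_perm slots _ false
  have hmain := a_fold_eq f g ordered [] PySem.Dict.empty none 0 hsort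
      (by intro x hx; simp at hx) rfl
  simp only [List.length_nil, Nat.cast_zero, zero_add, List.nil_append] at hmain
  rw [hmain]
  -- both sides fold over `ordered`; the inserted values agree elementwise
  have hfun : (fun (d' : PySem.Dict String Int) (s : String) =>
        d'.insert (g s) (1 + (cntGT f ordered (f s) : Int)))
      = (fun (d : PySem.Dict String Int) (s : String) =>
        d.insert (g s)
          (1 + slots.foldl (fun c t => if f s < f t then c + 1 else c) (0 : Int))) := by
    funext d s
    rw [foldl_count f (f s) slots 0, zero_add]
    have : cntGT f slots (f s) = cntGT f ordered (f s) := by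
      simp only [cntGT]
      exact (hperm.countP_eq _).symm
    rw [this]
  rw [hfun]
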